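-- pv_equiv track=rewrite | github.com/dongdongjae/Convert-Table | utils/filter_condition.py | filter_condition
-- ===== SOURCE A (Python) =====
-- def filter_condition(arr):
--     result_arr = []
--
--     for i_idx, i in enumerate(arr[0]):
--         if i == 0:
--             continue
--         for j_idx, j in enumerate(arr[1]):
--             if j == 0:
--                 continue
--             for k_idx, k in enumerate(arr[2]):
--                 if k == 0:
--                     continue
--
--                 C_01 = 1 if i_idx == 0 else 2
--                 C_02 = 1 if j_idx == 0 else 2
--                 C_03 = 1 if k_idx == 0 else 2
--                 result_arr.append([C_01, C_02, C_03])
--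
--     return result_arr
-- ===== SOURCE B (Python) =====
-- def filter_condition(arr):
--     def labels(row):
--         return [1 if idx == 0 else 2 for idx, v in enumerate(row) if v != 0]
--     l0 = labels(arr[0])
--     if not l0:
--         return []
--     l1 = labels(arr[1])
--     if not l1:
--         return []
--     l2 = labels(arr[2])
--     return [[a, b, c] for a in l0 for b in l1 for c in l2]
-- ===== Notes on version B (the rewrite author's own statement) =====
-- stated objective: simpler
-- what changed: Each output row depends only on the positions of nonzero entries, so B precomputes one label list per row (1 for index 0, 2 otherwise) and returns their Cartesian product via comprehensions, replacing A's triple nested loop over the raw entries with repeated index tests.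
import Mathlib
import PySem

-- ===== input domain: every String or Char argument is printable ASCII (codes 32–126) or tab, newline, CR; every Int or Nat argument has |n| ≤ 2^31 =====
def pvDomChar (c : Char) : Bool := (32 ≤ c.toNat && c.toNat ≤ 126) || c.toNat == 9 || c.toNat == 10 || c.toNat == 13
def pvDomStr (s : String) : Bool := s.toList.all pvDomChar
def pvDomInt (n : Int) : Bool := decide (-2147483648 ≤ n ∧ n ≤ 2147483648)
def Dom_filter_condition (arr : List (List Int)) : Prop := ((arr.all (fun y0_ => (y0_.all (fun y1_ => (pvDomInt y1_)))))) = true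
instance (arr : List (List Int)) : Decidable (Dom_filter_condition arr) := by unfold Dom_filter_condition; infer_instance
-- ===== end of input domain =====

-- B precomputes a label per nonzero position of each row and returns the Cartesian
-- product of the three label lists, replacing A's triple nested loop (objective: simpler).

-- ===== PORT A =====
def filter_condition (arr : List (List Int)) : List (List Int) :=
  (PySem.List.enumerate ((PySem.List.pyGet? arr 0).getD []) 0).foldl (fun res ii =>
    if ii.2 = 0 then res else
    (PySem.List.enumerate ((PySem.List.pyGet? arr 1).getD []) 0).foldl (fun res jj =>
      if jj.2 = 0 then res else
      (PySem.List.enumerate ((PySem.List.pyGet? arr 2).getD []) 0).foldl (fun res kk =>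
        if kk.2 = 0 then res else
        res ++ [[if ii.1 = 0 then (1 : Int) else 2,
                 if jj.1 = 0 then (1 : Int) else 2,
                 if kk.1 = 0 then (1 : Int) else 2]]) res) res) []

-- ===== PORT B =====
def pvLabels (row : List Int) : List Int :=
  (PySem.List.enumerate row 0).filterMap
    (fun p => if p.2 ≠ 0 then some (if p.1 = 0 then (1 : Int) else 2) else none)

def filter_condition_alt (arr : List (List Int)) : List (List Int) :=
  let l0 := pvLabels ((PySem.List.pyGet? arr 0).getD [])
  if l0 = [] then [] else
  let l1 := pvLabels ((PySem.List.pyGet? arr 1).getD [])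
  if l1 = [] then [] else
  let l2 := pvLabels ((PySem.List.pyGet? arr 2).getD [])
  l0.flatMap (fun a => l1.flatMap (fun b => l2.map (fun c => [a, b, c])))

-- ===== PRECONDITION & SPEC =====
-- Pre_ excludes exactly the inputs where Python A raises IndexError: arr must have a row 0;
-- row 1 is accessed only if row 0 has a nonzero entry, row 2 only if rows 0 and 1 both do.
def Pre_filter_condition (arr : List (List Int)) : Prop :=
  arr ≠ [] ∧
  ((arr.getD 0 []).any (fun v => v ≠ 0) = true →
    2 ≤ arr.length ∧
    ((arr.getD 1 []).any (fun v => v ≠ 0) = true → 3 ≤ arr.length))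
instance (arr : List (List Int)) : Decidable (Pre_filter_condition arr) := by
  unfold Pre_filter_condition; infer_instance

def pvWitness_filter_condition : List (List Int) := [[1, 0], [2], [0, 3]]

def Spec_filter_condition (arr : List (List Int)) (out : List (List Int)) : Prop := out = filter_condition_alt arr
instance (arr : List (List Int)) (out : List (List Int)) : Decidable (Spec_filter_condition arr out) := by unfold Spec_filter_condition; infer_instance

-- ===== CLAIM (what is proved, stated in full; the proofs are below) =====
def Claim_equal_filter_condition : Prop := ∀ (arr : List (List Int)), Dom_filter_condition arr → Pre_filter_condition arr → Spec_filter_condition arr (filter_condition arr)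

-- ===== LEMMAS AND PROOFS =====

-- nonzero index positions of a row (proof-only helper)
def pvIdx (row : List Int) : List Int :=
  (PySem.List.enumerate row 0).filterMap (fun p => if p.2 ≠ 0 then some p.1 else none)

-- the skip-zero append loop is a flatMap over the nonzero positions
theorem pv_foldl_skip {γ : Type} (e : List (Int × Int)) (F : List γ → Int → List γ)
    (X : Int → List γ) (hF : ∀ acc i, F acc i = acc ++ X i) (acc : List γ) :
    e.foldl (fun res p => if p.2 = 0 then res else F res p.1) acc
      = acc ++ (e.filterMap (fun p => if p.2 ≠ 0 then some p.1 else none)).flatMap X := by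
  induction e generalizing acc with
  | nil => simp
  | cons p e ih =>
    rw [List.foldl_cons, List.filterMap_cons]
    by_cases h : p.2 = 0
    · rw [if_pos h, ih]; simp [h]
    · rw [if_neg h, hF, ih]; simp [h]

theorem pvLabels_eq (row : List Int) :
    pvLabels row = (pvIdx row).map (fun i => if i = 0 then (1 : Int) else 2) := by
  unfold pvLabels pvIdx
  induction PySem.List.enumerate row 0 with
  | nil => rfl
  | cons p e ih =>
    by_cases h : p.2 = 0 <;> simp [h] <;> simpa using ih

theorem filter_condition_eq_flatMap (arr : List (List Int)) :
    filter_condition arr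
      = (pvIdx ((PySem.List.pyGet? arr 0).getD [])).flatMap (fun i =>
          (pvIdx ((PySem.List.pyGet? arr 1).getD [])).flatMap (fun j =>
            (pvIdx ((PySem.List.pyGet? arr 2).getD [])).map (fun k =>
              [if i = 0 then (1 : Int) else 2, if j = 0 then (1 : Int) else 2,
               if k = 0 then (1 : Int) else 2]))) := by
  have h2 : ∀ (i j : Int) (acc : List (List Int)),
      (PySem.List.enumerate ((PySem.List.pyGet? arr 2).getD []) 0).foldl
        (fun res kk => if kk.2 = 0 then res else
          res ++ [[if i = 0 then (1 : Int) else 2, if j = 0 then (1 : Int) else 2,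
                   if kk.1 = 0 then (1 : Int) else 2]]) acc
      = acc ++ ((PySem.List.enumerate ((PySem.List.pyGet? arr 2).getD []) 0).filterMap (fun p => if p.2 ≠ 0 then some p.1 else none)).flatMap (fun k =>
          [[if i = 0 then (1 : Int) else 2, if j = 0 then (1 : Int) else 2,
            if k = 0 then (1 : Int) else 2]]) :=
    fun i j acc => pv_foldl_skip (PySem.List.enumerate ((PySem.List.pyGet? arr 2).getD []) 0)
      (fun res k => res ++ [[if i = 0 then (1 : Int) else 2, if j = 0 then (1 : Int) else 2,
                             if k = 0 then (1 : Int) else 2]])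
      (fun k => [[if i = 0 then (1 : Int) else 2, if j = 0 then (1 : Int) else 2,
                  if k = 0 then (1 : Int) else 2]]) (fun _ _ => rfl) acc
  have h1 : ∀ (i : Int) (acc : List (List Int)),
      (PySem.List.enumerate ((PySem.List.pyGet? arr 1).getD []) 0).foldl
        (fun res jj => if jj.2 = 0 then res else
          (PySem.List.enumerate ((PySem.List.pyGet? arr 2).getD []) 0).foldl
            (fun res kk => if kk.2 = 0 then res else
              res ++ [[if i = 0 then (1 : Int) else 2, if jj.1 = 0 then (1 : Int) else 2,
                       if kk.1 = 0 then (1 : Int) else 2]]) res) acc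
      = acc ++ ((PySem.List.enumerate ((PySem.List.pyGet? arr 1).getD []) 0).filterMap (fun p => if p.2 ≠ 0 then some p.1 else none)).flatMap (fun j =>
          ((PySem.List.enumerate ((PySem.List.pyGet? arr 2).getD []) 0).filterMap (fun p => if p.2 ≠ 0 then some p.1 else none)).flatMap (fun k =>
            [[if i = 0 then (1 : Int) else 2, if j = 0 then (1 : Int) else 2,
              if k = 0 then (1 : Int) else 2]])) :=
    fun i acc => pv_foldl_skip (PySem.List.enumerate ((PySem.List.pyGet? arr 1).getD []) 0)
      (fun res j => (PySem.List.enumerate ((PySem.List.pyGet? arr 2).getD []) 0).foldl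
        (fun res kk => if kk.2 = 0 then res else
          res ++ [[if i = 0 then (1 : Int) else 2, if j = 0 then (1 : Int) else 2,
                   if kk.1 = 0 then (1 : Int) else 2]]) res)
      (fun j => ((PySem.List.enumerate ((PySem.List.pyGet? arr 2).getD []) 0).filterMap (fun p => if p.2 ≠ 0 then some p.1 else none)).flatMap (fun k =>
        [[if i = 0 then (1 : Int) else 2, if j = 0 then (1 : Int) else 2,
          if k = 0 then (1 : Int) else 2]]))
      (fun acc j => h2 i j acc) acc
  have h0 := pv_foldl_skip
    (PySem.List.enumerate ((PySem.List.pyGet? arr 0).getD []) 0) _ _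
    (fun acc i => h1 i acc) []
  unfold filter_condition pvIdx
  rw [h0]
  simp only [List.nil_append]
  apply List.flatMap_congr
  intro i _
  apply List.flatMap_congr
  intro j _
  exact (List.map_eq_flatMap).symm

-- ===== VERDICT (by name: the statement is the Claim_ definition above) =====
theorem filter_condition_spec : Claim_equal_filter_condition := by
  intro arr _ _
  unfold Spec_filter_condition filter_condition_alt
  rw [filter_condition_eq_flatMap]
  set r0 := (PySem.List.pyGet? arr 0).getD []
  set r1 := (PySem.List.pyGet? arr 1).getD []
  set r2 := (PySem.List.pyGet? arr 2).getD []
  by_cases h0 : pvLabels r0 = []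
  · have : pvIdx r0 = [] := by
      have := pvLabels_eq r0; rw [h0] at this
      exact (List.map_eq_nil_iff.mp this.symm)
    simp [h0, this]
  · by_cases h1 : pvLabels r1 = []
    · have : pvIdx r1 = [] := by
        have := pvLabels_eq r1; rw [h1] at this
        exact (List.map_eq_nil_iff.mp this.symm)
      simp [h0, h1, this]
    · simp only [h0, h1]
      rw [pvLabels_eq r0, pvLabels_eq r1, pvLabels_eq r2]
      rw [List.flatMap_map]
      apply List.flatMap_congr
      intro i _
      rw [List.flatMap_map]
      apply List.flatMap_congr
      intro j _
      rw [List.map_map]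
      rfl
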